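-- pv_equiv track=rewrite | github.com/snorrwe/advent-of-code | python/day04/main.py | validate_p2
-- ===== SOURCE A (Python) =====
-- from collections import defaultdict
--
-- def validate_p2(pw):
--     pw = str(pw)
--     count = defaultdict(lambda: 0)
--     for letter in pw:
--         count[letter] += 1
--     pt2 = any(v == 2 for v in count.values())
--     return (len(pw) == 6 and list(pw) == sorted(pw)
--             and len(pw) != len(set(pw)) and pt2)
-- ===== SOURCE B (Python) =====
-- def _has_run_of_two(s):
--     # scan consecutive runs; True iff some run has length exactly 2
--     if not s:
--         return False
--     prev = s[0]
--     run = 1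
--     for ch in s[1:]:
--         if ch == prev:
--             run += 1
--         else:
--             if run == 2:
--                 return True
--             prev, run = ch, 1
--     return run == 2
--
--
-- def validate_p2(pw):
--     s = str(pw)
--     if len(s) == 6 and list(s) == sorted(s):
--         return _has_run_of_two(s)
--     return False
-- ===== Notes on version B (the rewrite author's own statement) =====
-- stated objective: alternative
-- what changed: Replaces A's global frequency dict plus separate set()-duplicate test with a single short-circuiting scan over consecutive runs: on a sorted string a run of length exactly two is the same as some character having global count two, and it already implies a duplicate, so the dict, the duplicate test and the any() over counts all disappear.
import Mathlib
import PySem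

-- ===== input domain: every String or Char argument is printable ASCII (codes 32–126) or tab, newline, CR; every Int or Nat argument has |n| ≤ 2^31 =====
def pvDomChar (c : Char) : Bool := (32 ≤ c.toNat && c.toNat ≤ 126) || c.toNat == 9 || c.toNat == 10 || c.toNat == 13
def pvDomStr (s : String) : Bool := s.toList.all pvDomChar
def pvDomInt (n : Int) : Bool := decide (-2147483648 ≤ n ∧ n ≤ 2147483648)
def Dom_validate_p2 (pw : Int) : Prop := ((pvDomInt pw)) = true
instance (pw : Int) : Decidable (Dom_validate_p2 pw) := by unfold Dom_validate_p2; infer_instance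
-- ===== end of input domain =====

-- B replaces A's global frequency dict + separate set()-duplicate test with one short-circuiting
-- scan over consecutive runs (equivalent because the result is guarded by the sortedness check).


-- ===== PORT A =====
def validate_p2 (pw : Int) : Bool :=
  let s : List Char := PySem.Int.toChars pw
  let count : PySem.Dict Char Int :=
    s.foldl (fun d x => d.modify x 0 (fun x => x + 1)) PySem.Dict.empty
  let pt2 : Bool := count.values.any (fun v => v == 2)
  decide (s.length = 6) && (s == PySem.List.sorted s (fun x => x))
    && decide ((s.length : Int) ≠ PySem.Set.len (PySem.Set.ofList s)) && pt2

-- ===== PORT B =====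
-- the scan of _has_run_of_two: prev = c, current run length = n
def pvRunTwoAux (c : Char) (n : Nat) : List Char → Bool
  | [] => n == 2
  | d :: rest => if d == c then pvRunTwoAux c (n + 1) rest
                 else if n == 2 then true else pvRunTwoAux d 1 rest

def pvHasRunTwo : List Char → Bool
  | [] => false
  | c :: rest => pvRunTwoAux c 1 rest

def validate_p2_alt (pw : Int) : Bool :=
  let s : List Char := PySem.Int.toChars pw
  if decide (s.length = 6) && (s == PySem.List.sorted s (fun x => x)) then
    pvHasRunTwo s
  else
    false

-- ===== PRECONDITION & SPEC =====
def Spec_validate_p2 (pw : Int) (out : Bool) : Prop := out = validate_p2_alt pw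
instance (pw : Int) (out : Bool) : Decidable (Spec_validate_p2 pw out) := by unfold Spec_validate_p2; infer_instance

-- ===== CLAIM (what is proved, stated in full; the proofs are below) =====
def Claim_equal_validate_p2 : Prop := ∀ (pw : Int), Dom_validate_p2 pw → Spec_validate_p2 pw (validate_p2 pw)

-- ===== LEMMAS AND PROOFS =====

-- run lengths of consecutive equal elements (proof-side mirror of B's scan)
def pvRunAux (c : Char) (n : Nat) : List Char → List Nat
  | [] => [n]
  | d :: rest => if d == c then pvRunAux c (n + 1) rest else n :: pvRunAux d 1 rest

def pvRuns : List Char → List Nat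
  | [] => []
  | c :: rest => pvRunAux c 1 rest

theorem pvRunTwoAux_eq_any (l : List Char) : ∀ (c : Char) (n : Nat),
    pvRunTwoAux c n l = (pvRunAux c n l).any (fun r => r == 2) := by
  induction l with
  | nil => intro c n; simp [pvRunTwoAux, pvRunAux]
  | cons d rest ih =>
    intro c n
    simp only [pvRunTwoAux, pvRunAux]
    by_cases h : d == c
    · simp [h, ih]
    · simp only [h, Bool.false_eq_true, if_false, List.any_cons]
      by_cases hn : n = 2 <;> simp [hn, ih]

theorem pvHasRunTwo_eq_any (l : List Char) :
    pvHasRunTwo l = (pvRuns l).any (fun r => r == 2) := by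
  cases l with
  | nil => rfl
  | cons c rest => exact pvRunTwoAux_eq_any rest c 1

theorem pvRunAux_sum (l : List Char) : ∀ (c : Char) (n : Nat),
    (pvRunAux c n l).sum = n + l.length := by
  induction l with
  | nil => intro c n; simp [pvRunAux]
  | cons d rest ih =>
    intro c n
    simp only [pvRunAux]
    by_cases h : d == c
    · simp [h, ih]; omega
    · simp [h, ih]; omega

theorem pvRuns_sum (l : List Char) : (pvRuns l).sum = l.length := by
  cases l with
  | nil => rfl
  | cons c rest => simp [pvRuns, pvRunAux_sum, Nat.add_comm]

theorem pvRunAux_pos (l : List Char) : ∀ (c : Char) (n : Nat), 1 ≤ n →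
    ∀ r ∈ pvRunAux c n l, 1 ≤ r := by
  induction l with
  | nil => intro c n hn r hr; simp [pvRunAux] at hr; omega
  | cons d rest ih =>
    intro c n hn r hr
    simp only [pvRunAux] at hr
    by_cases h : d == c
    · simp only [h, if_true] at hr; exact ih c (n + 1) (by omega) r hr
    · simp only [h, Bool.false_eq_true, if_false, List.mem_cons] at hr
      rcases hr with rfl | hr
      · exact hn
      · exact ih d 1 le_rfl r hr

theorem pvRuns_pos (l : List Char) : ∀ r ∈ pvRuns l, 1 ≤ r := by
  cases l with
  | nil => simp [pvRuns]
  | cons c rest => exact pvRunAux_pos rest c 1 le_rfl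

theorem pvLen_le_sum (ns : List Nat) (hpos : ∀ r ∈ ns, 1 ≤ r) : ns.length ≤ ns.sum := by
  induction ns with
  | nil => simp
  | cons a t ih =>
    have ha := hpos a (by simp)
    have ht := ih (fun r hr => hpos r (by simp [hr]))
    simp only [List.length_cons, List.sum_cons]
    omega

theorem pvSum_gt_length (ns : List Nat) (hpos : ∀ r ∈ ns, 1 ≤ r)
    (h2 : ∃ r ∈ ns, r = 2) : ns.length < ns.sum := by
  induction ns with
  | nil => simp at h2
  | cons a t ih =>
    have ha := hpos a (by simp)
    simp only [List.length_cons, List.sum_cons]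
    rcases h2 with ⟨r, hr, hr2⟩
    subst hr2
    rcases List.mem_cons.mp hr with hra | hrt
    · have := pvLen_le_sum t (fun r hr => hpos r (by simp [hr]))
      omega
    · have := ih (fun r hr => hpos r (by simp [hr])) ⟨2, hrt, rfl⟩
      omega

-- pushing a fresh element through the first-occurrences fold
theorem pvFoldl_add_cons (d : List Char) : ∀ (a : Char) (s : List Char), a ∉ d →
    d.foldl PySem.Set.add (a :: s) = a :: d.foldl PySem.Set.add s := by
  induction d with
  | nil => intro a s _; rfl
  | cons x xs ih =>
    intro a s ha
    have hax : (a == x) = false := by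
      simp only [beq_eq_false_iff_ne, ne_eq]
      intro h; exact ha (by simp [h])
    have hxa : x ≠ a := fun h => by simp [h] at hax
    have hstep : PySem.Set.add (a :: s) x = a :: PySem.Set.add s x := by
      by_cases hc : x ∈ s <;>
        simp [PySem.Set.add, PySem.Set.contains, hc, hxa]
    simp only [List.foldl_cons, hstep]
    exact ih a (PySem.Set.add s x) (fun h => ha (by simp [h]))

theorem pvFoldl_add_allc (t : List Char) (c : Char) (s : List Char)
    (hs : PySem.Set.contains s c = true) (h : ∀ x ∈ t, x = c) :
    t.foldl PySem.Set.add s = s := by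
  induction t with
  | nil => rfl
  | cons x xs ih =>
    have hx : x = c := h x (by simp)
    have hcs : c ∈ s := by simpa [PySem.Set.contains] using hs
    have : PySem.Set.add s x = s := by
      simp [PySem.Set.add, PySem.Set.contains, hx, hcs]
    rw [List.foldl_cons, this]
    exact ih (fun y hy => h y (by simp [hy]))

theorem pvRunAux_all_eq (t : List Char) : ∀ (c : Char) (n : Nat), (∀ x ∈ t, x = c) →
    ∀ d, pvRunAux c n (t ++ d) = pvRunAux c (n + t.length) d := by
  induction t with
  | nil => intro c n _ d; simp
  | cons x xs ih =>
    intro c n h d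
    have hx : x = c := h x (by simp)
    simp only [List.cons_append, pvRunAux, hx, beq_self_eq_true, if_true]
    rw [ih c (n + 1) (fun y hy => h y (by simp [hy])) d]
    congr 1
    simp only [List.length_cons]
    omega

theorem pvRuns_eq_map_count : ∀ (n : Nat) (l : List Char), l.length ≤ n →
    l.Pairwise (· ≤ ·) →
    pvRuns l = (PySem.Set.ofList l).map (fun c => l.count c) := by
  intro n
  induction n with
  | zero =>
    intro l hl _
    have : l = [] := List.eq_nil_of_length_eq_zero (by omega)
    subst this; rfl
  | succ n ih =>
    intro l hl hp
    cases l with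
    | nil => rfl
    | cons c rest =>
      have htd : rest.takeWhile (· == c) ++ rest.dropWhile (· == c) = rest :=
        List.takeWhile_append_dropWhile
      generalize hT : rest.takeWhile (· == c) = t at htd
      generalize hD : rest.dropWhile (· == c) = d at htd
      have htc : ∀ x ∈ t, x = c := by
        intro x hx
        have := List.mem_takeWhile_imp (hT ▸ hx)
        exact eq_of_beq this
      rcases List.pairwise_cons.mp hp with ⟨hcle, hrest⟩
      have hdsub : d.Sublist rest := hD ▸ List.dropWhile_sublist _
      have hdp : d.Pairwise (· ≤ ·) := hrest.sublist hdsub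
      have hcd : c ∉ d := by
        intro hc
        cases d with
        | nil => simp at hc
        | cons e es =>
          have hne : (e == c) = false := by
            have hw : rest.dropWhile (· == c) ≠ [] := by rw [hD]; simp
            have := List.head_dropWhile_not (fun x => x == c) hw
            simpa [hD] using this
          have hec : e ≠ c := by simpa using hne
          have hce : c ≤ e := hcle e (hdsub.subset (by simp))
          rcases List.mem_cons.mp hc with h | h
          · exact hec h.symm
          · have hee : e ≤ c := (List.pairwise_cons.mp hdp).1 c h
            exact hec (le_antisymm hee hce)
      -- the set of first occurrences
      have hofl : PySem.Set.ofList (c :: rest) = c :: PySem.Set.ofList d := by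
        show (c :: rest).foldl PySem.Set.add PySem.Set.empty = _
        rw [List.foldl_cons]
        have h0 : PySem.Set.add PySem.Set.empty c = [c] := rfl
        rw [h0, ← htd, List.foldl_append]
        rw [pvFoldl_add_allc t c [c] (by simp [PySem.Set.contains]) htc]
        rw [pvFoldl_add_cons d c [] hcd]
        rfl
      -- the run decomposition
      have hruns : pvRuns (c :: rest) = (1 + t.length) :: pvRuns d := by
        show pvRunAux c 1 rest = _
        rw [← htd, pvRunAux_all_eq t c 1 htc d]
        cases d with
        | nil => simp [pvRunAux, pvRuns]
        | cons e es =>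
          have hec : (e == c) = false := by
            simp only [beq_eq_false_iff_ne, ne_eq]
            intro h; exact hcd (by simp [h])
          simp [pvRunAux, pvRuns, hec]
      -- counts
      have hcount_c : (c :: rest).count c = 1 + t.length := by
        rw [← htd]
        have h1 : t.count c = t.length := List.count_eq_length.mpr
          (fun b hb => (htc b hb).symm)
        have h2 : d.count c = 0 := List.count_eq_zero.mpr hcd
        simp [List.count_append, h1, h2]
        omega
      have hcount_d : ∀ x ∈ PySem.Set.ofList d, (c :: rest).count x = d.count x := by
        intro x hx
        have hxd : x ∈ d := (PySem.Set.mem_ofList d x).mp hx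
        have hxc : (c == x) = false := by
          simp only [beq_eq_false_iff_ne, ne_eq]
          intro h; exact hcd (h ▸ hxd)
        have hcx : c ≠ x := by simpa using hxc
        have hxt : t.count x = 0 := List.count_eq_zero.mpr
          (fun hxmem => hcx ((htc x hxmem).symm))
        rw [← htd]
        simp [List.count_cons, List.count_append, hxt, hxc]
      -- assemble
      have hdlen : d.length ≤ n := by
        have := hdsub.length_le
        simp only [List.length_cons] at hl
        omega
      rw [hruns, hofl, List.map_cons, ih d hdlen hdp]
      congr 1
      · exact hcount_c.symm
      · exact List.map_congr_left (fun x hx => (hcount_d x hx).symm)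

theorem pvBeqCast (n : Nat) : ((n : Int) == 2) = (n == 2) := by
  by_cases h : n = 2
  · simp [h]
  · have : ¬ ((n : Int) = 2) := by omega
    simp [h, this]

-- the heart: on a (≤)-sorted list, "duplicates exist and some global count is 2"
-- is the same as "some consecutive run has length exactly 2"
theorem pvKey (l : List Char) (h : l.Pairwise (· ≤ ·)) :
    (decide ((l.length : Int) ≠ PySem.Set.len (PySem.Set.ofList l))
      && ((PySem.Set.ofList l).any (fun k => l.count k == 2))) = pvHasRunTwo l := by
  rw [pvHasRunTwo_eq_any]
  have hmap := pvRuns_eq_map_count l.length l le_rfl h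
  rw [hmap, List.any_map]
  cases hb : (PySem.Set.ofList l).any (fun k => l.count k == 2) with
  | false =>
    have : ((PySem.Set.ofList l).any ((fun r => r == 2) ∘ fun c => l.count c)) = false := by
      simpa [Function.comp] using hb
    simp [this]
  | true =>
    rcases List.any_eq_true.mp hb with ⟨k, hk, hk2⟩
    have hk2' : l.count k = 2 := by simpa using hk2
    have h2 : ∃ r ∈ pvRuns l, r = 2 := by
      rw [hmap]
      exact ⟨l.count k, List.mem_map.mpr ⟨k, hk, rfl⟩, hk2'⟩
    have hlt : (pvRuns l).length < (pvRuns l).sum := pvSum_gt_length _ (pvRuns_pos l) h2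
    have hsum := pvRuns_sum l
    have hlen : (pvRuns l).length = (PySem.Set.ofList l).length := by
      rw [hmap, List.length_map]
    have hne2 : l.length ≠ (PySem.Set.ofList l).length := by omega
    have hne : (l.length : Int) ≠ PySem.Set.len (PySem.Set.ofList l) := by
      simp only [PySem.Set.len]
      exact_mod_cast hne2
    have : ((PySem.Set.ofList l).any ((fun r => r == 2) ∘ fun c => l.count c)) = true := by
      simpa [Function.comp] using hb
    simp [hne2, this]

theorem pvAnyCast (xs : List Char) (f : Char → Nat) :
    (xs.any (fun k => ((f k : Int) == 2))) = xs.any (fun k => f k == 2) :=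
  List.any_congr rfl (fun k => pvBeqCast (f k))

-- ===== VERDICT (by name: the statement is the Claim_ definition above) =====
theorem pvPt2 (l : List Char) :
    ((l.foldl (fun d x => d.modify x 0 (fun x => x + 1))
        (PySem.Dict.empty : PySem.Dict Char Int)).values.any (fun v => v == 2))
      = (PySem.Set.ofList l).any (fun k => l.count k == 2) := by
  show ((PySem.Dict.counter l).items.map (fun x => x.2)).any (fun v => v == 2) = _
  rw [PySem.Dict.items_counter, List.map_map, List.any_map]
  exact pvAnyCast (PySem.Set.ofList l) (fun k => l.count k)

theorem validate_p2_spec : Claim_equal_validate_p2 := by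
  intro pw _
  show validate_p2 pw = validate_p2_alt pw
  simp only [validate_p2, validate_p2_alt]
  generalize PySem.Int.toChars pw = l
  rw [pvPt2]
  by_cases hsort : (l == PySem.List.sorted l (fun x => x)) = true
  · have hseq : PySem.List.sorted l (fun x => x) = l := (eq_of_beq hsort).symm
    have hpair : l.Pairwise (· ≤ ·) := hseq ▸ PySem.List.sorted_pairwise l (fun x => x)
    by_cases h6 : l.length = 6
    · simp only [h6, hsort, decide_true, Bool.true_and, if_true]
      have hk := pvKey l hpair
      rw [h6] at hk
      exact hk
    · simp [h6]
  · simp [hsort]
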